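-- pv_equiv track=rewrite | github.com/jwade109/bagelbot | src/othello.py | iter_coords_in_dir
-- ===== SOURCE A (Python) =====
-- def is_valid_coord(x, y, w, h):
--     return x >= 0 and x < w and y >= 0 and y < h
--
-- def iter_coords_in_dir(x, y, d, w, h):
--     dxs = [0, 1, 1, 1, 0, -1, -1, -1]
--     dys = [1, 1, 0, -1, -1, -1, 0, 1]
--     dx, dy = dxs[d], dys[d]
--     i, j = x, y
--     while True:
--         i += dx
--         j += dy
--         if is_valid_coord(i, j, w, h):
--             yield i, j
--         else:
--             break
-- ===== SOURCE B (Python) =====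
-- def iter_coords_in_dir(x, y, d, w, h):
--     dxs = [0, 1, 1, 1, 0, -1, -1, -1]
--     dys = [1, 1, 0, -1, -1, -1, 0, 1]
--     dx, dy = dxs[d], dys[d]
--
--     def axis_limit(p, dp, size):
--         # number of valid consecutive steps s >= 1 with 0 <= p + dp*s < size
--         # (None means this axis never constrains)
--         if dp == 1:
--             return max(size - 1 - p, 0) if p + 1 >= 0 else 0
--         if dp == -1:
--             return max(p, 0) if p - 1 < size else 0
--         return None if 0 <= p < size else 0
--
--     lims = [a for a in (axis_limit(x, dx, w), axis_limit(y, dy, h)) if a is not None]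
--     lim = min(lims) if lims else 0
--     for s in range(1, lim + 1):
--         yield (x + dx * s, y + dy * s)
-- ===== Notes on version B (the rewrite author's own statement) =====
-- stated objective: alternative
-- what changed: B computes a closed-form step limit per axis (min of the clamped distances to the board edges, with off-board zero-delta axes yielding 0) and emits the coordinates directly, instead of A's step-and-test walk cell by cell.
import Mathlib
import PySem

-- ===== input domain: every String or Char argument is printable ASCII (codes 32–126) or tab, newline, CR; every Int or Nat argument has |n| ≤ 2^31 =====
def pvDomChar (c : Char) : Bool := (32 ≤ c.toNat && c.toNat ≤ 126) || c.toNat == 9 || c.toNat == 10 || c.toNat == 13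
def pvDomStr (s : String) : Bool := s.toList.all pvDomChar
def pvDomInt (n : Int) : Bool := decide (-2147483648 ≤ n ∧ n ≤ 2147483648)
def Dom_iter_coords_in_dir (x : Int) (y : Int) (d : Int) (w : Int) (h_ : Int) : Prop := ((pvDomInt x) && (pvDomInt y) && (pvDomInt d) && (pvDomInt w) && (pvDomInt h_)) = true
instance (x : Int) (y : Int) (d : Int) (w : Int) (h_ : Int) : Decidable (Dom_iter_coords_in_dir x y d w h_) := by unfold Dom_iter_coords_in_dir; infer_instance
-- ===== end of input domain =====

-- B replaces A's cell-by-cell step-and-test walk by a closed-form step limit computed once from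
-- the distances to the board edges; equivalence is about the list of yielded pairs.

-- ===== PORT A =====
def is_valid_coord (x y w h : Int) : Bool :=
  decide (0 ≤ x) && decide (x < w) && decide (0 ≤ y) && decide (y < h)

-- the while-True loop of A: step by (dx,dy), yield while on the board.
-- The fuel argument only makes the recursion structural; pv_lim_lt below proves the
-- fuel used by iter_coords_in_dir always exceeds the number of loop iterations.
def pvLoopA (dx dy w h_ : Int) : Nat → Int → Int → List (Int × Int)
  | 0, _, _ => []
  | fuel + 1, i, j =>
      if is_valid_coord (i + dx) (j + dy) w h_ then
        (i + dx, j + dy) :: pvLoopA dx dy w h_ fuel (i + dx) (j + dy)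
      else []

def iter_coords_in_dir (x : Int) (y : Int) (d : Int) (w : Int) (h_ : Int) : List (Int × Int) :=
  let dxs : List Int := [0, 1, 1, 1, 0, -1, -1, -1]
  let dys : List Int := [1, 1, 0, -1, -1, -1, 0, 1]
  match PySem.List.pyGet? dxs d, PySem.List.pyGet? dys d with
  | some dx, some dy => pvLoopA dx dy w h_ (x.natAbs + y.natAbs + w.natAbs + h_.natAbs + 1) x y
  | _, _ => []   -- Python raises IndexError here; excluded by Pre_

-- ===== PORT B =====
-- number of valid consecutive steps s ≥ 1 with 0 ≤ p + dp*s < size; none = this axis never constrains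
def pvAxisLimit (p dp size : Int) : Option Int :=
  if dp = 1 then some (if 0 ≤ p + 1 then max (size - 1 - p) 0 else 0)
  else if dp = -1 then some (if p - 1 < size then max p 0 else 0)
  else if 0 ≤ p ∧ p < size then none else some 0

def pvLim (dx dy x y w h_ : Int) : Int :=
  match pvAxisLimit x dx w, pvAxisLimit y dy h_ with
  | some a, some b => min a b
  | some a, none => a
  | none, some b => b
  | none, none => 0

def iter_coords_in_dir_alt (x : Int) (y : Int) (d : Int) (w : Int) (h_ : Int) : List (Int × Int) :=
  let dxs : List Int := [0, 1, 1, 1, 0, -1, -1, -1]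
  let dys : List Int := [1, 1, 0, -1, -1, -1, 0, 1]
  match PySem.List.pyGet? dxs d with
  | none => []   -- Python raises IndexError here; excluded by Pre_
  | some dx =>
    match PySem.List.pyGet? dys d with
    | none => []   -- Python raises IndexError here; excluded by Pre_
    | some dy =>
        let lim := pvLim dx dy x y w h_
        (PySem.List.pyRange 1 (lim + 1) 1).map (fun s => (x + dx * s, y + dy * s))

-- ===== PRECONDITION & SPEC =====
-- Pre_ excludes exactly the directions d outside -8..7, on which Python A raises IndexError.
def Pre_iter_coords_in_dir (x : Int) (y : Int) (d : Int) (w : Int) (h_ : Int) : Prop :=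
  -8 ≤ d ∧ d < 8
instance (x : Int) (y : Int) (d : Int) (w : Int) (h_ : Int) : Decidable (Pre_iter_coords_in_dir x y d w h_) := by unfold Pre_iter_coords_in_dir; infer_instance

def pvWitness_iter_coords_in_dir : Int × Int × Int × Int × Int := (2, 1, 3, 5, 4)

def Spec_iter_coords_in_dir (x : Int) (y : Int) (d : Int) (w : Int) (h_ : Int) (out : List (Int × Int)) : Prop := out = iter_coords_in_dir_alt x y d w h_
instance (x : Int) (y : Int) (d : Int) (w : Int) (h_ : Int) (out : List (Int × Int)) : Decidable (Spec_iter_coords_in_dir x y d w h_ out) := by unfold Spec_iter_coords_in_dir; infer_instance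

-- ===== CLAIM (what is proved, stated in full; the proofs are below) =====
def Claim_equal_iter_coords_in_dir : Prop := ∀ (x : Int) (y : Int) (d : Int) (w : Int) (h_ : Int), Dom_iter_coords_in_dir x y d w h_ → Pre_iter_coords_in_dir x y d w h_ → Spec_iter_coords_in_dir x y d w h_ (iter_coords_in_dir x y d w h_)

-- ===== LEMMAS AND PROOFS =====

-- any in-range direction index selects unit deltas, not both zero
lemma pv_dir_shape (d : Int) (h8 : -8 ≤ d ∧ d < 8) :
    ∃ dx dy : Int,
      PySem.List.pyGet? ([0, 1, 1, 1, 0, -1, -1, -1] : List Int) d = some dx ∧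
      PySem.List.pyGet? ([1, 1, 0, -1, -1, -1, 0, 1] : List Int) d = some dy ∧
      (dx = -1 ∨ dx = 0 ∨ dx = 1) ∧ (dy = -1 ∨ dy = 0 ∨ dy = 1) ∧ ¬(dx = 0 ∧ dy = 0) := by
  obtain ⟨h1, h2⟩ := h8
  interval_cases d <;>
    first
    | exact ⟨0, 1, by decide⟩
    | exact ⟨1, 1, by decide⟩
    | exact ⟨1, 0, by decide⟩
    | exact ⟨1, -1, by decide⟩
    | exact ⟨0, -1, by decide⟩
    | exact ⟨-1, -1, by decide⟩
    | exact ⟨-1, 0, by decide⟩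
    | exact ⟨-1, 1, by decide⟩

-- the limit is positive exactly when the first step lands on the board, and then decreases by 1 per step
lemma pv_lim_spec (dx dy w h_ : Int)
    (hdx : dx = -1 ∨ dx = 0 ∨ dx = 1) (hdy : dy = -1 ∨ dy = 0 ∨ dy = 1)
    (hz : ¬(dx = 0 ∧ dy = 0)) (i j : Int) :
    (is_valid_coord (i + dx) (j + dy) w h_ = true →
        1 ≤ pvLim dx dy i j w h_ ∧
        pvLim dx dy (i + dx) (j + dy) w h_ = pvLim dx dy i j w h_ - 1) ∧
    (is_valid_coord (i + dx) (j + dy) w h_ = false → pvLim dx dy i j w h_ ≤ 0) := by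
  rcases hdx with hdx | hdx | hdx <;> rcases hdy with hdy | hdy | hdy <;>
    subst hdx <;> subst hdy <;>
    simp only [pvLim, pvAxisLimit, is_valid_coord, Bool.and_eq_true, Bool.and_eq_false_iff,
      decide_eq_true_eq, decide_eq_false_iff_not] <;>
    first
    | exact absurd ⟨rfl, rfl⟩ hz
    | (norm_num; split_ifs <;> (try dsimp only) <;> constructor <;> intro hv <;> omega)

-- the limit is strictly below the fuel iter_coords_in_dir supplies
lemma pv_lim_lt (dx dy w h_ : Int)
    (hdx : dx = -1 ∨ dx = 0 ∨ dx = 1) (hdy : dy = -1 ∨ dy = 0 ∨ dy = 1)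
    (hz : ¬(dx = 0 ∧ dy = 0)) (x y : Int) :
    (pvLim dx dy x y w h_).toNat < x.natAbs + y.natAbs + w.natAbs + h_.natAbs + 1 := by
  rcases hdx with hdx | hdx | hdx <;> rcases hdy with hdy | hdy | hdy <;>
    subst hdx <;> subst hdy <;>
    simp only [pvLim, pvAxisLimit] <;>
    first
    | exact absurd ⟨rfl, rfl⟩ hz
    | (split_ifs <;> (try dsimp only) <;> omega)

-- the walk equals the closed-form enumeration of pvLim-many steps, given enough fuel
lemma pv_loop_eq (dx dy w h_ : Int)
    (hdx : dx = -1 ∨ dx = 0 ∨ dx = 1) (hdy : dy = -1 ∨ dy = 0 ∨ dy = 1)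
    (hz : ¬(dx = 0 ∧ dy = 0)) :
    ∀ (fuel : Nat) (i j : Int), (pvLim dx dy i j w h_).toNat < fuel →
      pvLoopA dx dy w h_ fuel i j
        = (List.range (pvLim dx dy i j w h_).toNat).map
            (fun s : Nat => (i + dx * (s + 1), j + dy * (s + 1))) := by
  intro fuel
  induction fuel with
  | zero => intro i j hn; omega
  | succ fuel ih =>
      intro i j hn
      rcases hv : is_valid_coord (i + dx) (j + dy) w h_ with _ | _
      · have hle := (pv_lim_spec dx dy w h_ hdx hdy hz i j).2 hv
        simp [pvLoopA, hv]
        omega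
      · obtain ⟨hpos, hstep⟩ := (pv_lim_spec dx dy w h_ hdx hdy hz i j).1 hv
        simp only [pvLoopA, hv, if_true]
        rw [ih (i + dx) (j + dy) (by omega)]
        rw [show (pvLim dx dy i j w h_).toNat
              = (pvLim dx dy (i + dx) (j + dy) w h_).toNat + 1 by omega]
        rw [List.range_succ_eq_map, List.map_cons, List.map_map]
        norm_num
        intro a _
        constructor <;> ring

-- ===== VERDICT (by name: the statement is the Claim_ definition above) =====
theorem iter_coords_in_dir_spec : Claim_equal_iter_coords_in_dir := by
  intro x y d w h_ _ hpre
  obtain ⟨dx, dy, hdx, hdy, hsx, hsy, hz⟩ := pv_dir_shape d hpre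
  unfold Spec_iter_coords_in_dir iter_coords_in_dir iter_coords_in_dir_alt
  simp only [hdx, hdy]
  rw [pv_loop_eq dx dy w h_ hsx hsy hz _ x y (pv_lim_lt dx dy w h_ hsx hsy hz x y)]
  rw [PySem.List.pyRange_one, List.map_map]
  have : (pvLim dx dy x y w h_ + 1 - 1).toNat = (pvLim dx dy x y w h_).toNat := by omega
  rw [this]
  refine List.map_congr_left (fun s _ => ?_)
  simp only [Function.comp_apply, Prod.mk.injEq]
  constructor <;> ring
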